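-- pv_equiv track=rewrite | github.com/schxo99/coding-test | 프로그래머스/레벨 3/최고의 집합.py | solution
-- ===== SOURCE A (Python) =====
-- def solution(n, s):
--     if n > s:
--         return [-1]
--     arr = [s//n for i in range(n)]
--     for i in range(s%n):
--         arr[i]+=1
--     arr.sort()
--     return arr
-- ===== SOURCE B (Python) =====
-- def solution(n, s):
--     if n > s:
--         return [-1]
--     out = []
--     while n > 0:
--         q = s // n
--         out.append(q)
--         s -= q
--         n -= 1
--     return out
-- ===== Notes on version B (the rewrite author's own statement) =====
-- stated objective: alternative
-- what changed: Replaces A's build-all-then-increment-prefix-then-sort with a greedy single loop that repeatedly emits s//n (the floor of the remaining average) and recurses on the remainder, producing the sorted balanced set directly with no sort and no second pass.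
import Mathlib
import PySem

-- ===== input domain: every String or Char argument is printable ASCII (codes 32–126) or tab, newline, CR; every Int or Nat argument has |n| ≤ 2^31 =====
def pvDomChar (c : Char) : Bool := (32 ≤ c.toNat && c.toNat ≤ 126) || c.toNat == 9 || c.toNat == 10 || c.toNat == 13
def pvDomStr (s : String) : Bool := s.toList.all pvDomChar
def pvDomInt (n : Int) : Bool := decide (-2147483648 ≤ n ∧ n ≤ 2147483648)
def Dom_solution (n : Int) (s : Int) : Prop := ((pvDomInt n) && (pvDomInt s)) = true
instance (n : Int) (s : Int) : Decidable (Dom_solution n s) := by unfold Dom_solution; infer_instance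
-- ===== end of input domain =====

-- B replaces A's build/increment-prefix/sort with a greedy loop that repeatedly emits
-- s//n for the remaining sum s and count n; it yields the sorted balanced set directly.

-- ===== PORT A =====
def solution (n : Int) (s : Int) : List Int :=
  if n > s then [-1]
  else
    -- arr = [s//n for i in range(n)]
    let arr := (PySem.List.pyRange 0 n 1).map (fun _ => PySem.Int.floordiv s n)
    -- for i in range(s%n): arr[i] += 1   (i is always in range for the admitted inputs)
    let arr := (PySem.List.pyRange 0 (PySem.Int.mod s n) 1).foldl
      (fun a i => a.set i.toNat (a.getD i.toNat 0 + 1)) arr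
    PySem.List.sorted arr (fun x => x) false

-- ===== PORT B =====
-- the while loop of Source B: n counts down, s is the remaining sum, list built front-to-back
def solutionAltLoop : Nat → Int → List Int
  | 0, _ => []
  | Nat.succ k, s =>
    let q := PySem.Int.floordiv s (k + 1)
    q :: solutionAltLoop k (s - q)

def solution_alt (n : Int) (s : Int) : List Int :=
  if n > s then [-1] else solutionAltLoop n.toNat s

-- ===== PRECONDITION & SPEC =====
-- Pre_ excludes only n = 0 with s ≥ 0, where Python A raises ZeroDivisionError (s % 0).
def Pre_solution (n : Int) (s : Int) : Prop := n = 0 → s < 0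
instance (n : Int) (s : Int) : Decidable (Pre_solution n s) := by unfold Pre_solution; infer_instance
def pvWitness_solution : Int × Int := (3, 11)
def Spec_solution (n : Int) (s : Int) (out : List Int) : Prop := out = solution_alt n s
instance (n : Int) (s : Int) (out : List Int) : Decidable (Spec_solution n s out) := by unfold Spec_solution; infer_instance

-- ===== CLAIM (what is proved, stated in full; the proofs are below) =====
def Claim_equal_solution : Prop := ∀ (n : Int) (s : Int), Dom_solution n s → Pre_solution n s → Spec_solution n s (solution n s)

-- ===== LEMMAS AND PROOFS =====

lemma getD_repl (k : Nat) (x y : Int) (l2 : List Int) :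
    (List.replicate k x ++ y :: l2).getD k 0 = y := by
  induction k with
  | zero => rfl
  | succ k ih => simp [List.replicate_succ]

lemma set_repl (k : Nat) (x y z : Int) (l2 : List Int) :
    (List.replicate k x ++ y :: l2).set k z = List.replicate k x ++ z :: l2 := by
  induction k with
  | zero => rfl
  | succ k ih => simp [List.replicate_succ]

-- A's increment loop turns the first k copies of q into q+1
lemma fold_incr (q : Int) : ∀ (k m : Nat), k ≤ m →
    (PySem.List.pyRange 0 (k : Int) 1).foldl
      (fun a i => a.set i.toNat (a.getD i.toNat 0 + 1)) (List.replicate m q)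
    = List.replicate k (q + 1) ++ List.replicate (m - k) q := by
  intro k
  induction k with
  | zero => intro m _; simp [PySem.List.pyRange_one_eq_nil]
  | succ k ih =>
    intro m hkm
    rw [show ((k + 1 : Nat) : Int) = (k : Int) + 1 by push_cast; ring,
        PySem.List.pyRange_one_succ_right (by positivity), List.foldl_append, ih m (by omega)]
    have hmk : m - k = (m - (k + 1)) + 1 := by omega
    rw [hmk, List.replicate_succ]
    simp only [List.foldl_cons, List.foldl_nil, Int.toNat_natCast]
    rw [getD_repl, set_repl]
    simp [List.replicate_succ', List.append_assoc]

lemma sorted_repl (a b : Nat) (q : Int) :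
    PySem.List.sorted (List.replicate a (q + 1) ++ List.replicate b q) (fun x => x) false
    = List.replicate b q ++ List.replicate a (q + 1) := by
  apply PySem.List.sorted_id_eq_of_perm_of_pairwise
  · exact List.perm_append_comm
  · rw [List.pairwise_append]
    refine ⟨List.pairwise_replicate.mpr (by omega), List.pairwise_replicate.mpr (by omega), ?_⟩
    intro x hx y hy
    rw [List.eq_of_mem_replicate hx, List.eq_of_mem_replicate hy]
    omega

-- B's greedy loop produces the sorted balanced set in closed form
lemma altLoop_eq : ∀ (k : Nat) (s : Int), 0 < k →
    solutionAltLoop k s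
    = List.replicate (k - (PySem.Int.mod s k).toNat) (PySem.Int.floordiv s k)
      ++ List.replicate (PySem.Int.mod s k).toNat (PySem.Int.floordiv s k + 1) := by
  intro k
  induction k with
  | zero => intro s h; omega
  | succ k ih =>
    intro s _
    have hcast : ((k + 1 : Nat) : Int) = (k : Int) + 1 := by push_cast; ring
    rw [hcast]
    have hk1 : (0 : Int) < (k : Int) + 1 := by positivity
    have hdiv : PySem.Int.floordiv s ((k : Int) + 1) = s / ((k : Int) + 1) :=
      PySem.Int.floordiv_eq_ediv_of_pos hk1
    have hmod : PySem.Int.mod s ((k : Int) + 1) = s % ((k : Int) + 1) :=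
      PySem.Int.mod_eq_emod_of_pos hk1
    set q := s / ((k : Int) + 1) with hq
    set r := s % ((k : Int) + 1) with hr
    have hrnn : 0 ≤ r := Int.emod_nonneg s (by omega)
    have hrlt : r < (k : Int) + 1 := Int.emod_lt_of_pos s hk1
    have hs : s = ((k : Int) + 1) * q + r := by
      have h := Int.mul_ediv_add_emod s ((k : Int) + 1)
      rw [← hq, ← hr] at h; linarith
    show (PySem.Int.floordiv s ((k:Int)+1)) ::
        solutionAltLoop k (s - PySem.Int.floordiv s ((k:Int)+1)) = _
    rw [hdiv, hmod]
    rcases Nat.eq_zero_or_pos k with hk0 | hkpos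
    · subst hk0
      have hr0 : r = 0 := by omega
      have hsq : s = q := by norm_num at hs; omega
      simp [solutionAltLoop, hr0, ← hsq]
    · have hkI : (0 : Int) < (k : Int) := by exact_mod_cast hkpos
      by_cases hrk : r = (k : Int)
      · -- s - q = k*(q+1): new quotient q+1, remainder 0
        have hsq : s - q = (k : Int) * (q + 1) := by rw [hs, hrk]; ring
        have hdiv' : (s - q) / (k : Int) = q + 1 := by
          rw [hsq]; exact Int.mul_ediv_cancel_left _ (by omega)
        have hmod' : (s - q) % (k : Int) = 0 := by
          rw [hsq]; simp [Int.mul_emod_right]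
        rw [ih (s - q) hkpos, PySem.Int.floordiv_eq_ediv_of_pos hkI,
            PySem.Int.mod_eq_emod_of_pos hkI, hdiv', hmod']
        have hrt : r.toNat = k := by omega
        simp [hrt, List.replicate_succ]
      · -- r < k: new quotient q, remainder r
        have hrklt : r < (k : Int) := by omega
        have hsq : s - q = r + (k : Int) * q := by rw [hs]; ring
        have hdiv' : (s - q) / (k : Int) = q := by
          rw [hsq, Int.add_mul_ediv_left r q (by omega : (k : Int) ≠ 0),
              Int.ediv_eq_zero_of_lt hrnn hrklt]
          ring
        have hmod' : (s - q) % (k : Int) = r := by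
          rw [hsq, Int.add_mul_emod_self_left]
          exact Int.emod_eq_of_lt hrnn hrklt
        rw [ih (s - q) hkpos, PySem.Int.floordiv_eq_ediv_of_pos hkI,
            PySem.Int.mod_eq_emod_of_pos hkI, hdiv', hmod']
        rw [show k + 1 - r.toNat = (k - r.toNat) + 1 by omega, List.replicate_succ]
        simp

-- ===== VERDICT (by name: the statement is the Claim_ definition above) =====
theorem solution_spec : Claim_equal_solution := by
  intro n s _ hpre
  unfold Spec_solution solution solution_alt
  by_cases hns : n > s
  · simp [hns]
  · simp only [if_neg hns]
    by_cases hn : 0 < n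
    · have hrlt := PySem.Int.mod_lt s hn
      have hrnn := PySem.Int.mod_nonneg s hn
      set r := PySem.Int.mod s n with hr
      set q := PySem.Int.floordiv s n with hq
      have hrn : r = ((r.toNat : Nat) : Int) := by omega
      have hmap : (PySem.List.pyRange 0 n 1).map (fun _ => q) = List.replicate n.toNat q := by
        rw [List.map_const']
        simp [PySem.List.length_pyRange_one]
      rw [hmap, hrn, fold_incr q r.toNat n.toNat (by omega), sorted_repl]
      rw [altLoop_eq n.toNat s (by omega), show ((n.toNat : Nat) : Int) = n by omega, ← hr, ← hq]
    · -- n < 0 (n = 0 with s ≥ 0 is excluded; n = 0, s < 0 went to the [-1] branch)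
      have hneg : n < 0 := by
        rcases lt_or_eq_of_le (not_lt.mp hn) with h | h
        · exact h
        · exact absurd (hpre h) (by omega)
      obtain ⟨hb1, hb2⟩ := PySem.Int.mod_neg_bounds s hneg
      rw [PySem.List.pyRange_one_eq_nil (le_of_lt hneg), PySem.List.pyRange_one_eq_nil hb2]
      simp [PySem.List.sorted_eq_nil_iff, solutionAltLoop, Int.toNat_of_nonpos (le_of_lt hneg)]
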